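-- pv_equiv track=rewrite | github.com/lin-frederic/CaMiT | annotation/clean_outlier/rebalance_test.py | collect_reject
-- ===== SOURCE A (Python) =====
-- def collect_reject(train_class_time_distribution,test_class_time_distribution):
--     rejected_class_time_pairs = {}
--     for class_name, time_distribution in test_class_time_distribution.items():
--         for time, time_images in time_distribution.items():
--             if class_name not in train_class_time_distribution or time not in train_class_time_distribution[class_name]:
--                 train_count = 0
--             else:
--                 train_count = len(train_class_time_distribution[class_name][time])
--             test_count = len(time_images)
--             reject = train_count + test_count < 80
--
--             if reject:
--                 if class_name not in rejected_class_time_pairs: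
--                     rejected_class_time_pairs[class_name] = set()
--                 rejected_class_time_pairs[class_name].add(time)
--
--     for class_name, time_distribution in train_class_time_distribution.items():
--         for time, time_images in time_distribution.items():
--             if class_name not in test_class_time_distribution or time not in test_class_time_distribution[class_name]:
--                 test_count = 0
--             else:
--                 test_count = len(test_class_time_distribution[class_name][time])
--             train_count = len(time_images)
--             reject = train_count + test_count < 80
--
--             if reject:
--                 if class_name not in rejected_class_time_pairs:
--                     rejected_class_time_pairs[class_name] = set()
--                 rejected_class_time_pairs[class_name].add(time)
--
--     return rejected_class_time_pairs
-- ===== SOURCE B (Python) =====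
-- def collect_reject(train_class_time_distribution, test_class_time_distribution):
--     # Aggregate first: one combined counter (class, time) -> total image count over
--     # both splits, built without ever looking one dict up from inside the other;
--     # then a single threshold scan over the counter groups the failing times by class.
--     counts = {}
--     for dist in (test_class_time_distribution, train_class_time_distribution):
--         for class_name, time_distribution in dist.items():
--             for time, time_images in time_distribution.items():
--                 counts[(class_name, time)] = counts.get((class_name, time), 0) + len(time_images)
--     rejected_class_time_pairs = {}
--     for (class_name, time), total in counts.items():
--         if total < 80:
--             rejected_class_time_pairs.setdefault(class_name, set()).add(time)
--     return rejected_class_time_pairs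
-- ===== Notes on version B (the rewrite author's own statement) =====
-- stated objective: alternative
-- what changed: A makes two nested passes each looking the current pair up in the OTHER dict to get its count; B never cross-looks-up: it aggregates one combined (class,time)->count counter over both dicts and then does a single threshold scan over the counter, grouping failing times by class.
import Mathlib
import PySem

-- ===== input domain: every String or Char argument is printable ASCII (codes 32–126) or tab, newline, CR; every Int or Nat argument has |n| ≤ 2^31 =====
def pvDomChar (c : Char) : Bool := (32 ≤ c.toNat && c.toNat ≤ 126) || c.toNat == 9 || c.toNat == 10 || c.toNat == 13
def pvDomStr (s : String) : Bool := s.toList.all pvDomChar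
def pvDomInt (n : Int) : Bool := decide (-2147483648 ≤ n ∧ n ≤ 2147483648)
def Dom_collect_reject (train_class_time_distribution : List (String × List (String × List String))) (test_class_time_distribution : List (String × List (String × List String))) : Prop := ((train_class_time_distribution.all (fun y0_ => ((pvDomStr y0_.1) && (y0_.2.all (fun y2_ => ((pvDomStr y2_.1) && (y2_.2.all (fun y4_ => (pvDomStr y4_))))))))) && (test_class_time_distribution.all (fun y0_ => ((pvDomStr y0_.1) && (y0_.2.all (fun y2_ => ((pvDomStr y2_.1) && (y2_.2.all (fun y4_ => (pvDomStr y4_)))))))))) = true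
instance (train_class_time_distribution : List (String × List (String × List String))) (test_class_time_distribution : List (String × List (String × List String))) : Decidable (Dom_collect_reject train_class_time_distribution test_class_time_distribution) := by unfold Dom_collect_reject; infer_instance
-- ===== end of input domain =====

-- B replaces A's two cross-looking-up passes by aggregating one combined
-- (class, time) -> count dictionary over both inputs and then one threshold
-- scan over it (objective: alternative).

-- ===== PORT A =====
-- the repeated "if class not in rejected: rejected[class] = set(); rejected[class].add(time)" snippet
def pvRejAdd (r : PySem.Dict String (PySem.Set String)) (c t : String) :
    PySem.Dict String (PySem.Set String) :=
  let r := if r.contains c then r else r.insert c PySem.Set.empty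
  r.modify c PySem.Set.empty (fun s => PySem.Set.add s t)

-- body of A's first (test) loop, for outer key c and inner item ti = (time, time_images)
def pvTestStep (train : List (String × List (String × List String))) (c : String)
    (r : PySem.Dict String (PySem.Set String)) (ti : String × List String) :
    PySem.Dict String (PySem.Set String) :=
  let train_count : Nat :=
    match (PySem.Dict.mk train).get? c with
    | none => 0
    | some td =>
      match (PySem.Dict.mk td).get? ti.1 with
      | none => 0
      | some imgs => imgs.length
  let test_count : Nat := ti.2.length
  if train_count + test_count < 80 then pvRejAdd r c ti.1 else r

-- body of A's second (train) loop
def pvTrainStep (test : List (String × List (String × List String))) (c : String)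
    (r : PySem.Dict String (PySem.Set String)) (ti : String × List String) :
    PySem.Dict String (PySem.Set String) :=
  let test_count : Nat :=
    match (PySem.Dict.mk test).get? c with
    | none => 0
    | some td =>
      match (PySem.Dict.mk td).get? ti.1 with
      | none => 0
      | some imgs => imgs.length
  let train_count : Nat := ti.2.length
  if train_count + test_count < 80 then pvRejAdd r c ti.1 else r

def collect_reject (train_class_time_distribution : List (String × List (String × List String))) (test_class_time_distribution : List (String × List (String × List String))) : List (String × List String) :=
  let r1 := test_class_time_distribution.foldl
    (fun r cd => cd.2.foldl (pvTestStep train_class_time_distribution cd.1) r)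
    PySem.Dict.empty
  let r2 := train_class_time_distribution.foldl
    (fun r cd => cd.2.foldl (pvTrainStep test_class_time_distribution cd.1) r)
    r1
  r2.items

-- ===== PORT B =====
-- B's innermost aggregation step: counts[(c, t)] = counts.get((c, t), 0) + len(imgs)
def pvCntAdd (d : PySem.Dict (String × String) Nat) (c : String) (ti : String × List String) :
    PySem.Dict (String × String) Nat :=
  d.modify (c, ti.1) 0 (· + ti.2.length)

-- B's threshold step: if total < 80: rejected.setdefault(c, set()).add(t)
def pvRejStep (out : PySem.Dict String (PySem.Set String)) (e : (String × String) × Nat) :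
    PySem.Dict String (PySem.Set String) :=
  if e.2 < 80 then out.modify e.1.1 PySem.Set.empty (fun s => PySem.Set.add s e.1.2) else out

def collect_reject_alt (train_class_time_distribution : List (String × List (String × List String))) (test_class_time_distribution : List (String × List (String × List String))) : List (String × List String) :=
  let counts : PySem.Dict (String × String) Nat :=
    [test_class_time_distribution, train_class_time_distribution].foldl
      (fun d dist => dist.foldl (fun d cd => cd.2.foldl (fun d ti => pvCntAdd d cd.1 ti) d) d)
      PySem.Dict.empty
  (counts.items.foldl pvRejStep PySem.Dict.empty).items

-- ===== PRECONDITION & SPEC =====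
-- Pre_ says the two association lists really encode Python dicts (dict keys are unique,
-- outer and inner); duplicate-key lists do not arise from any Python call of A.
def Pre_collect_reject (train_class_time_distribution : List (String × List (String × List String))) (test_class_time_distribution : List (String × List (String × List String))) : Prop :=
  (train_class_time_distribution.map Prod.fst).Nodup ∧
  (test_class_time_distribution.map Prod.fst).Nodup ∧
  (∀ e ∈ train_class_time_distribution, (e.2.map Prod.fst).Nodup) ∧
  (∀ e ∈ test_class_time_distribution, (e.2.map Prod.fst).Nodup)
instance (train_class_time_distribution : List (String × List (String × List String))) (test_class_time_distribution : List (String × List (String × List String))) : Decidable (Pre_collect_reject train_class_time_distribution test_class_time_distribution) := by unfold Pre_collect_reject; infer_instance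

def pvWitness_collect_reject : (List (String × List (String × List String))) × (List (String × List (String × List String))) :=
  ([("car", [("2010", ["a", "b"])])], [("car", [("2011", ["c"])])])

def Spec_collect_reject (train_class_time_distribution : List (String × List (String × List String))) (test_class_time_distribution : List (String × List (String × List String))) (out : List (String × List String)) : Prop := out = collect_reject_alt train_class_time_distribution test_class_time_distribution
instance (train_class_time_distribution : List (String × List (String × List String))) (test_class_time_distribution : List (String × List (String × List String))) (out : List (String × List String)) : Decidable (Spec_collect_reject train_class_time_distribution test_class_time_distribution out) := by unfold Spec_collect_reject; infer_instance

-- ===== CLAIM (what is proved, stated in full; the proofs are below) =====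
def Claim_equal_collect_reject : Prop := ∀ (train_class_time_distribution : List (String × List (String × List String))) (test_class_time_distribution : List (String × List (String × List String))), Dom_collect_reject train_class_time_distribution test_class_time_distribution → Pre_collect_reject train_class_time_distribution test_class_time_distribution → Spec_collect_reject train_class_time_distribution test_class_time_distribution (collect_reject train_class_time_distribution test_class_time_distribution)

-- ===== LEMMAS AND PROOFS =====

-- proof-side abbreviations: the (class, time) pairs of a distribution, the
-- ((class, time), count) entries B aggregates, and the common reject step both
-- programs are reduced to
def pvPairs (d : List (String × List (String × List String))) : List (String × String) :=
  d.flatMap fun cd => cd.2.map fun ti => (cd.1, ti.1)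

def pvEntries (d : List (String × List (String × List String))) : List ((String × String) × Nat) :=
  d.flatMap fun cd => cd.2.map fun ti => ((cd.1, ti.1), ti.2.length)

-- len(d[c][t]) if the pair is present else 0
def pvPairCount (d : List (String × List (String × List String))) (c t : String) : Nat :=
  match (PySem.Dict.mk d).get? c with
  | none => 0
  | some td =>
    match (PySem.Dict.mk td).get? t with
    | none => 0
    | some imgs => imgs.length

-- c in d and t in d[c]
def pvHasPair (d : List (String × List (String × List String))) (c t : String) : Bool :=
  match (PySem.Dict.mk d).get? c with
  | none => false
  | some td => (PySem.Dict.mk td).contains t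

-- the common normal form of one reject decision for pair ct
def pvBStep (train test : List (String × List (String × List String)))
    (out : PySem.Dict String (PySem.Set String)) (ct : String × String) :
    PySem.Dict String (PySem.Set String) :=
  if pvPairCount train ct.1 ct.2 + pvPairCount test ct.1 ct.2 < 80 then
    out.modify ct.1 PySem.Set.empty (fun s => PySem.Set.add s ct.2)
  else out

-- first-match lookup on a nodup-keyed association list finds the member pair
theorem pv_get?_of_nodup {α : Type} {d : List (String × α)} {k : String} {v : α}
    (hnd : (d.map Prod.fst).Nodup) (hm : (k, v) ∈ d) :
    (PySem.Dict.mk d).get? k = some v := by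
  induction d with
  | nil => cases hm
  | cons a tl ih =>
    rw [List.map_cons, List.nodup_cons] at hnd
    rw [PySem.Dict.get?_mk_cons]
    rcases List.mem_cons.1 hm with h | h
    · simp [← h]
    · have hk : a.1 ≠ k := by
        intro he
        exact hnd.1 (by simpa [he] using List.mem_map_of_mem (f := Prod.fst) h)
      simp only [beq_iff_eq, if_neg hk]
      exact ih hnd.2 h

theorem pv_get?_eq_none_of_not_contains {κ ν : Type} [BEq κ] (d : PySem.Dict κ ν) (k : κ)
    (h : d.contains k = false) : d.get? k = none := by
  simp only [PySem.Dict.get?, PySem.Dict.contains, List.any_eq_false] at *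
  rw [List.find?_eq_none.2 (by intro p hp; exact h p hp)]
  rfl

-- the two-step add of A is the one-step modify of the normal form
theorem pvRejAdd_eq (r : PySem.Dict String (PySem.Set String)) (c t : String) :
    pvRejAdd r c t = r.modify c PySem.Set.empty (fun s => PySem.Set.add s t) := by
  show (if r.contains c then r else r.insert c PySem.Set.empty).modify c PySem.Set.empty
      (fun s => PySem.Set.add s t) = _
  by_cases h : r.contains c
  · rw [if_pos h]
  · rw [if_neg (by simp [h])]
    simp only [PySem.Dict.modify]
    rw [PySem.Dict.getD_insert_self, PySem.Dict.insert_insert_self]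
    rw [PySem.Dict.getD, pv_get?_eq_none_of_not_contains r c (by simpa using h)]
    rfl

theorem pv_map_replace_eq {κ ν : Type} [BEq κ] [LawfulBEq κ] {k : κ} {v : ν} :
    ∀ (l : List (κ × ν)), (l.map Prod.fst).Nodup →
    l.find? (fun p => p.1 == k) = some (k, v) →
    l.map (fun p => if p.1 == k then (k, v) else p) = l := by
  intro l
  induction l with
  | nil => intro _ h; cases h
  | cons a tl ih =>
    intro hnd hfind
    rw [List.map_cons, List.nodup_cons] at hnd
    rw [List.find?_cons] at hfind
    rw [List.map_cons]
    by_cases hb : (a.1 == k) = true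
    · simp only [hb] at hfind
      rw [if_pos hb]
      injection hfind with ha
      rw [← ha]
      congr 1
      conv_rhs => rw [← List.map_id tl]
      apply List.map_congr_left
      intro p hp
      have hnk : ¬ ((p.1 == k) = true) := by
        intro hpk
        exact hnd.1 (by
          have : p.1 = a.1 := by rw [beq_iff_eq.1 hpk, ← beq_iff_eq.1 hb]
          simpa [← this] using List.mem_map_of_mem (f := Prod.fst) hp)
      simp [hnk]
    · simp only [Bool.not_eq_true] at hb
      simp only [hb] at hfind
      rw [if_neg (by simp [hb])]
      rw [ih hnd.2 hfind]

theorem pv_insert_eq_self {κ ν : Type} [BEq κ] [LawfulBEq κ] (d : PySem.Dict κ ν) (k : κ) (v : ν)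
    (hnd : (d.items.map Prod.fst).Nodup) (h : d.get? k = some v) : d.insert k v = d := by
  have hfind : d.items.find? (fun p => p.1 == k) = some (k, v) := by
    simp only [PySem.Dict.get?, Option.map_eq_some_iff] at h
    obtain ⟨⟨p1, p2⟩, hp, hv⟩ := h
    have h1 := List.find?_some hp
    simp only [beq_iff_eq] at h1
    dsimp at hv
    rw [h1, hv] at hp
    exact hp
  have hcont : d.contains k = true := by
    simp only [PySem.Dict.contains, List.any_eq_true]
    exact ⟨(k, v), List.mem_of_find?_eq_some hfind, by simp⟩
  rw [PySem.Dict.insert, if_pos hcont]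
  have hmap := pv_map_replace_eq d.items hnd hfind
  cases d
  simpa using hmap

theorem pv_keys_nodup_bstep (train test : List (String × List (String × List String)))
    (out : PySem.Dict String (PySem.Set String)) (ct : String × String)
    (h : (out.items.map Prod.fst).Nodup) :
    ((pvBStep train test out ct).items.map Prod.fst).Nodup := by
  have h' : out.keys.Nodup := by simpa [PySem.Dict.keys] using h
  unfold pvBStep
  split
  · have := PySem.Dict.nodup_keys_foldl_insert [ct.1]
      (fun d _ => PySem.Set.add (d.getD ct.1 PySem.Set.empty) ct.2) out h'
    simp only [List.foldl_cons, List.foldl_nil] at this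
    simpa [PySem.Dict.keys, PySem.Dict.modify] using this
  · exact h

theorem pv_mem_getD_bstep (train test : List (String × List (String × List String)))
    (out : PySem.Dict String (PySem.Set String)) (ct : String × String) {c y : String}
    (h : y ∈ out.getD c PySem.Set.empty) :
    y ∈ (pvBStep train test out ct).getD c PySem.Set.empty := by
  unfold pvBStep
  split
  · by_cases hc : c = ct.1
    · subst hc
      rw [PySem.Dict.getD_modify_self]
      exact (PySem.Set.mem_add _ _ _).2 (Or.inl h)
    · rw [PySem.Dict.getD_modify_of_ne _ _ _ hc]
      exact h
  · exact h

theorem pv_mem_getD_foldl (train test : List (String × List (String × List String)))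
    (L : List (String × String)) (s : PySem.Dict String (PySem.Set String)) {c y : String}
    (h : y ∈ s.getD c PySem.Set.empty) :
    y ∈ (L.foldl (pvBStep train test) s).getD c PySem.Set.empty := by
  induction L generalizing s with
  | nil => exact h
  | cons a L ih => exact ih _ (pv_mem_getD_bstep train test s a h)

-- after folding over L, every rejected pair of L is recorded
theorem pv_mem_after_foldl (train test : List (String × List (String × List String)))
    (L : List (String × String)) (s : PySem.Dict String (PySem.Set String))
    {ct : String × String} (hm : ct ∈ L)
    (hr : pvPairCount train ct.1 ct.2 + pvPairCount test ct.1 ct.2 < 80) :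
    ct.2 ∈ (L.foldl (pvBStep train test) s).getD ct.1 PySem.Set.empty := by
  induction L generalizing s with
  | nil => cases hm
  | cons a L ih =>
    rcases List.mem_cons.1 hm with h | h
    · subst h
      rw [List.foldl_cons]
      apply pv_mem_getD_foldl
      unfold pvBStep
      rw [if_pos hr, PySem.Dict.getD_modify_self]
      exact (PySem.Set.mem_add _ _ _).2 (Or.inr rfl)
    · exact ih _ h

-- pvHasPair certifies membership among the test pairs
theorem pv_hasPair_mem (test : List (String × List (String × List String))) {c t : String}
    (h : pvHasPair test c t = true) : (c, t) ∈ pvPairs test := by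
  unfold pvHasPair at h
  cases hg : (PySem.Dict.mk test).get? c with
  | none => rw [hg] at h; cases h
  | some td =>
    rw [hg] at h
    simp only [PySem.Dict.get?, Option.map_eq_some_iff] at hg
    obtain ⟨⟨c1, td'⟩, hp, hv⟩ := hg
    have h1 := List.find?_some hp
    simp only [beq_iff_eq] at h1
    dsimp at hv
    simp only [PySem.Dict.contains, List.any_eq_true] at h
    obtain ⟨p, hpd, hpt⟩ := h
    simp only [beq_iff_eq] at hpt
    refine List.mem_flatMap.2 ⟨(c1, td'), List.mem_of_find?_eq_some hp, ?_⟩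
    refine List.mem_map.2 ⟨p, by rw [hv]; exact hpd, ?_⟩
    simp [h1, hpt]

-- membership among the pairs certifies pvHasPair (needs nodup keys)
theorem pv_mem_hasPair (test : List (String × List (String × List String))) {c t : String}
    (hnd : (test.map Prod.fst).Nodup)
    (h : (c, t) ∈ pvPairs test) : pvHasPair test c t = true := by
  obtain ⟨cd, hcd, hmap⟩ := List.mem_flatMap.1 h
  obtain ⟨ti, hti, heq⟩ := List.mem_map.1 hmap
  have hc : cd.1 = c := congrArg Prod.fst heq
  have ht : ti.1 = t := congrArg Prod.snd heq
  have hg : (PySem.Dict.mk test).get? c = some cd.2 := by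
    rw [← hc]; exact pv_get?_of_nodup hnd (Prod.mk.eta ▸ hcd)
  unfold pvHasPair
  rw [hg]
  simp only [PySem.Dict.contains, List.any_eq_true]
  exact ⟨ti, hti, by simp [ht]⟩

-- a pair already recorded is a no-op for pvBStep
theorem pv_bstep_skip (train test : List (String × List (String × List String)))
    (s : PySem.Dict String (PySem.Set String)) (ct : String × String)
    (hnd : (s.items.map Prod.fst).Nodup)
    (hmem : pvPairCount train ct.1 ct.2 + pvPairCount test ct.1 ct.2 < 80 →
      ct.2 ∈ s.getD ct.1 PySem.Set.empty) :
    pvBStep train test s ct = s := by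
  unfold pvBStep
  split
  case isFalse => rfl
  case isTrue hr =>
    have hmem' := hmem hr
    cases hg : s.get? ct.1 with
    | none =>
      rw [PySem.Dict.getD, hg] at hmem'
      cases hmem'
    | some v =>
      have hv : s.getD ct.1 PySem.Set.empty = v := by rw [PySem.Dict.getD, hg]; rfl
      rw [hv] at hmem'
      rw [PySem.Dict.modify, hv, PySem.Set.add_of_mem hmem']
      exact pv_insert_eq_self s ct.1 v hnd hg

-- shared pairs can be dropped from the second half of the fold
theorem pv_filter_fold (train test : List (String × List (String × List String)))
    (L : List (String × String)) (s : PySem.Dict String (PySem.Set String))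
    (hnd : (s.items.map Prod.fst).Nodup)
    (hinv : ∀ ct : String × String, pvHasPair test ct.1 ct.2 = true →
      pvPairCount train ct.1 ct.2 + pvPairCount test ct.1 ct.2 < 80 →
      ct.2 ∈ s.getD ct.1 PySem.Set.empty) :
    L.foldl (pvBStep train test) s =
      (L.filter fun ct => !(pvHasPair test ct.1 ct.2)).foldl (pvBStep train test) s := by
  induction L generalizing s with
  | nil => rfl
  | cons ct L ih =>
    by_cases hq : pvHasPair test ct.1 ct.2 = true
    · rw [List.foldl_cons, pv_bstep_skip train test s ct hnd (hinv ct hq),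
        List.filter_cons, if_neg (by simp [hq])]
      exact ih s hnd hinv
    · rw [List.foldl_cons, List.filter_cons,
        if_pos (by simp [hq]), List.foldl_cons]
      exact ih (pvBStep train test s ct)
        (pv_keys_nodup_bstep train test s ct hnd)
        (fun ct' h1 h2 => pv_mem_getD_bstep train test s ct (hinv ct' h1 h2))

-- A's test pass is the normal-form fold over its flattened pairs
theorem pv_inner_test (train test : List (String × List (String × List String)))
    (c : String) (td : List (String × List String)) (M : List (String × List String))
    (hM : ∀ ti ∈ M,
      (PySem.Dict.mk test).get? c = some td ∧ (PySem.Dict.mk td).get? ti.1 = some ti.2)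
    (s : PySem.Dict String (PySem.Set String)) :
    M.foldl (pvTestStep train c) s = (M.map fun ti => (c, ti.1)).foldl (pvBStep train test) s := by
  induction M generalizing s with
  | nil => rfl
  | cons ti M ih =>
    rw [List.map_cons, List.foldl_cons, List.foldl_cons]
    have hstep : pvTestStep train c s ti = pvBStep train test s (c, ti.1) := by
      obtain ⟨h1, h2⟩ := hM ti List.mem_cons_self
      simp only [pvTestStep, pvBStep, pvPairCount, pvRejAdd_eq, h1, h2]
    rw [hstep]
    exact ih (fun ti' h => hM ti' (List.mem_cons_of_mem _ h)) _

theorem pv_pass_test (train test : List (String × List (String × List String)))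
    (L : List (String × List (String × List String)))
    (hL : ∀ cd ∈ L, ∀ ti ∈ cd.2,
      (PySem.Dict.mk test).get? cd.1 = some cd.2 ∧ (PySem.Dict.mk cd.2).get? ti.1 = some ti.2)
    (s : PySem.Dict String (PySem.Set String)) :
    L.foldl (fun r cd => cd.2.foldl (pvTestStep train cd.1) r) s =
      (pvPairs L).foldl (pvBStep train test) s := by
  induction L generalizing s with
  | nil => rfl
  | cons cd L ih =>
    rw [pvPairs, List.flatMap_cons, List.foldl_append, List.foldl_cons,
      ← pv_inner_test train test cd.1 cd.2 cd.2 (hL cd List.mem_cons_self) s]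
    exact ih (fun cd' h => hL cd' (List.mem_cons_of_mem _ h)) _

-- A's train pass likewise
theorem pv_inner_train (train test : List (String × List (String × List String)))
    (c : String) (td : List (String × List String)) (M : List (String × List String))
    (hM : ∀ ti ∈ M,
      (PySem.Dict.mk train).get? c = some td ∧ (PySem.Dict.mk td).get? ti.1 = some ti.2)
    (s : PySem.Dict String (PySem.Set String)) :
    M.foldl (pvTrainStep test c) s = (M.map fun ti => (c, ti.1)).foldl (pvBStep train test) s := by
  induction M generalizing s with
  | nil => rfl
  | cons ti M ih =>
    rw [List.map_cons, List.foldl_cons, List.foldl_cons]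
    have hstep : pvTrainStep test c s ti = pvBStep train test s (c, ti.1) := by
      obtain ⟨h1, h2⟩ := hM ti List.mem_cons_self
      simp only [pvTrainStep, pvBStep, pvPairCount, pvRejAdd_eq, h1, h2]
    rw [hstep]
    exact ih (fun ti' h => hM ti' (List.mem_cons_of_mem _ h)) _

theorem pv_pass_train (train test : List (String × List (String × List String)))
    (L : List (String × List (String × List String)))
    (hL : ∀ cd ∈ L, ∀ ti ∈ cd.2,
      (PySem.Dict.mk train).get? cd.1 = some cd.2 ∧ (PySem.Dict.mk cd.2).get? ti.1 = some ti.2)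
    (s : PySem.Dict String (PySem.Set String)) :
    L.foldl (fun r cd => cd.2.foldl (pvTrainStep test cd.1) r) s =
      (pvPairs L).foldl (pvBStep train test) s := by
  induction L generalizing s with
  | nil => rfl
  | cons cd L ih =>
    rw [pvPairs, List.flatMap_cons, List.foldl_append, List.foldl_cons,
      ← pv_inner_train train test cd.1 cd.2 cd.2 (hL cd List.mem_cons_self) s]
    exact ih (fun cd' h => hL cd' (List.mem_cons_of_mem _ h)) _

theorem pv_keys_nodup_foldl (train test : List (String × List (String × List String)))
    (L : List (String × String)) (s : PySem.Dict String (PySem.Set String))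
    (h : (s.items.map Prod.fst).Nodup) :
    ((L.foldl (pvBStep train test) s).items.map Prod.fst).Nodup := by
  induction L generalizing s with
  | nil => exact h
  | cons a L ih => exact ih _ (pv_keys_nodup_bstep train test s a h)

-- ===== B-side lemmas: characterising the combined counter =====

-- B's nested aggregation loop over one distribution is the flat fold over its entries
theorem pv_cnt_flatten (L : List (String × List (String × List String)))
    (d : PySem.Dict (String × String) Nat) :
    L.foldl (fun d cd => cd.2.foldl (fun d ti => pvCntAdd d cd.1 ti) d) d =
      (pvEntries L).foldl (fun d e => d.modify e.1 0 (· + e.2)) d := by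
  induction L generalizing d with
  | nil => rfl
  | cons cd L ih =>
    rw [pvEntries, List.flatMap_cons, List.foldl_append, List.foldl_cons, List.foldl_map]
    exact ih _

-- value of the counter fold: starting value plus the sum of matching entries
theorem pv_cnt_getD (l : List ((String × String) × Nat)) (d : PySem.Dict (String × String) Nat)
    (k : String × String) :
    (l.foldl (fun d e => d.modify e.1 0 (· + e.2)) d).getD k 0 =
      d.getD k 0 + ((l.filter (fun e => e.1 == k)).map (·.2)).sum := by
  induction l generalizing d with
  | nil => simp
  | cons e l ih =>
    rw [List.foldl_cons, ih, List.filter_cons]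
    by_cases hk : e.1 = k
    · rw [if_pos (by simp [hk]), PySem.Dict.getD_modify, if_pos hk.symm, hk]
      simp [Nat.add_comm, Nat.add_assoc, Nat.add_left_comm]
    · rw [if_neg (by simp [hk]), PySem.Dict.getD_modify, if_neg (fun h => hk h.symm)]

-- keys of the counter fold: first occurrences of the entry keys, in order
theorem pv_cnt_keys (l : List ((String × String) × Nat)) :
    (l.foldl (fun d e => d.modify e.1 0 (· + e.2)) PySem.Dict.empty).keys =
      PySem.Set.ofList (l.map Prod.fst) := by
  have h := PySem.Dict.keys_foldl_modify_key l Prod.fst 0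
    (fun _ e => (· + e.2)) PySem.Dict.empty
  simpa [PySem.Dict.keys_empty, PySem.Set.update_nil_left] using h

theorem pv_cnt_keys_nodup (l : List ((String × String) × Nat)) :
    (l.foldl (fun d e => d.modify e.1 0 (· + e.2)) PySem.Dict.empty).keys.Nodup := by
  rw [pv_cnt_keys]
  exact PySem.Set.nodup_ofList _

-- entry keys are the pairs
theorem pv_entries_fst (d : List (String × List (String × List String))) :
    (pvEntries d).map Prod.fst = pvPairs d := by
  simp [pvEntries, pvPairs, List.map_flatMap, Function.comp_def]

-- every pair's first component is an outer key
theorem pv_pairs_fst_mem (d : List (String × List (String × List String)))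
    {p : String × String} (h : p ∈ pvPairs d) : p.1 ∈ d.map Prod.fst := by
  obtain ⟨cd, hcd, hmap⟩ := List.mem_flatMap.1 h
  obtain ⟨ti, _, heq⟩ := List.mem_map.1 hmap
  have : cd.1 = p.1 := congrArg Prod.fst heq
  exact this ▸ List.mem_map_of_mem (f := Prod.fst) hcd

-- the pairs of a nodup-keyed distribution are nodup
theorem pv_pairs_nodup (d : List (String × List (String × List String)))
    (hnd : (d.map Prod.fst).Nodup) (hin : ∀ e ∈ d, (e.2.map Prod.fst).Nodup) :
    (pvPairs d).Nodup := by
  induction d with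
  | nil => exact List.nodup_nil
  | cons cd d ih =>
    rw [List.map_cons, List.nodup_cons] at hnd
    rw [pvPairs, List.flatMap_cons]
    refine List.Nodup.append ?_ (ih hnd.2 (fun e he => hin e (List.mem_cons_of_mem _ he))) ?_
    · have h1 := hin cd List.mem_cons_self
      have : (cd.2.map fun ti => (cd.1, ti.1)) =
          (cd.2.map Prod.fst).map (fun t => (cd.1, t)) := by
        simp [List.map_map, Function.comp_def]
      rw [this]
      exact h1.map (fun a b hab => congrArg Prod.snd hab)
    · intro p hp hp'
      have h1 : p.1 = cd.1 := by
        obtain ⟨ti, _, heq⟩ := List.mem_map.1 hp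
        exact (congrArg Prod.fst heq).symm
      exact hnd.1 (h1 ▸ pv_pairs_fst_mem d hp')

-- matching-entry sum of one inner distribution = its lookup length
theorem pv_inner_sum (c : String) (td : List (String × List String)) (t : String)
    (hnd : (td.map Prod.fst).Nodup) :
    (((td.map fun ti => ((c, ti.1), ti.2.length)).filter
        (fun e => e.1 == (c, t))).map (·.2)).sum =
      (match (PySem.Dict.mk td).get? t with
       | none => 0
       | some imgs => imgs.length) := by
  induction td with
  | nil => simp [PySem.Dict.get?]
  | cons ti td ih =>
    rw [List.map_cons, List.nodup_cons] at hnd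
    rw [List.map_cons, List.filter_cons, PySem.Dict.get?_mk_cons]
    by_cases ht : ti.1 = t
    · rw [if_pos (by simp [ht])]
      have hrest : (td.map fun ti => ((c, ti.1), ti.2.length)).filter
          (fun e => e.1 == (c, t)) = [] := by
        apply List.filter_eq_nil_iff.2
        intro e he hb
        obtain ⟨ti', hti', heq⟩ := List.mem_map.1 he
        rw [← heq] at hb
        have h2 : ti'.1 = t := by simpa using hb
        exact hnd.1 (ht ▸ h2 ▸ List.mem_map_of_mem (f := Prod.fst) hti')
      rw [hrest]
      simp [ht]
    · rw [if_neg (by simp [ht]), if_neg (by simpa using ht)]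
      exact ih hnd.2

-- matching-entry sum over a whole distribution = pvPairCount
theorem pv_entries_sum (d : List (String × List (String × List String))) (c t : String)
    (hnd : (d.map Prod.fst).Nodup) (hin : ∀ e ∈ d, (e.2.map Prod.fst).Nodup) :
    (((pvEntries d).filter (fun e => e.1 == (c, t))).map (·.2)).sum = pvPairCount d c t := by
  induction d with
  | nil => simp [pvEntries, pvPairCount, PySem.Dict.get?]
  | cons cd d ih =>
    rw [List.map_cons, List.nodup_cons] at hnd
    rw [pvEntries, List.flatMap_cons, List.filter_append, List.map_append, List.sum_append]
    by_cases hc : cd.1 = c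
    · have hrest : ((d.flatMap fun cd => cd.2.map fun ti => ((cd.1, ti.1), ti.2.length)).filter
          (fun e => e.1 == (c, t))) = [] := by
        apply List.filter_eq_nil_iff.2
        intro e he hb
        have he1 : e.1 = (c, t) := by simpa using hb
        have : e.1 ∈ (pvEntries d).map Prod.fst := List.mem_map_of_mem (f := Prod.fst) he
        rw [pv_entries_fst] at this
        have := pv_pairs_fst_mem d (he1 ▸ this)
        exact hnd.1 (hc ▸ this)
      rw [hrest]
      subst hc
      rw [pvPairCount, PySem.Dict.get?_mk_cons, if_pos (by simp)]
      simpa using pv_inner_sum cd.1 cd.2 t (hin cd List.mem_cons_self)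
    · have hhead : ((cd.2.map fun ti => ((cd.1, ti.1), ti.2.length)).filter
          (fun e => e.1 == (c, t))) = [] := by
        apply List.filter_eq_nil_iff.2
        intro e he hb
        obtain ⟨ti', _, heq⟩ := List.mem_map.1 he
        have h1 : e.1.1 = cd.1 := by rw [← heq]
        have h2 : e.1 = (c, t) := by simpa using hb
        exact hc (by rw [← h1, h2])
      rw [hhead]
      have : pvPairCount (cd :: d) c t = pvPairCount d c t := by
        rw [pvPairCount, pvPairCount, PySem.Dict.get?_mk_cons, if_neg (by simpa using hc)]
      rw [this]
      simpa using ih hnd.2 (fun e he => hin e (List.mem_cons_of_mem _ he))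

-- B's reject scan over (pair, total) items is the normal-form fold, once totals are right
theorem pv_rej_fold (train test : List (String × List (String × List String)))
    (P : List (String × String)) (n : String × String → Nat)
    (s : PySem.Dict String (PySem.Set String))
    (hn : ∀ p ∈ P, n p = pvPairCount train p.1 p.2 + pvPairCount test p.1 p.2) :
    (P.map fun p => (p, n p)).foldl pvRejStep s = P.foldl (pvBStep train test) s := by
  induction P generalizing s with
  | nil => rfl
  | cons p P ih =>
    rw [List.map_cons, List.foldl_cons, List.foldl_cons]
    have hstep : pvRejStep s (p, n p) = pvBStep train test s p := by
      rw [pvRejStep, pvBStep, hn p List.mem_cons_self]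
    rw [hstep]
    exact ih _ (fun q hq => hn q (List.mem_cons_of_mem _ hq))

-- ===== VERDICT (by name: the statement is the Claim_ definition above) =====
theorem collect_reject_spec : Claim_equal_collect_reject := by
  intro train test _ hpre
  obtain ⟨hnt, hns, hint, hins⟩ := hpre
  unfold Spec_collect_reject
  show collect_reject train test = collect_reject_alt train test
  have hLtest : ∀ cd ∈ test, ∀ ti ∈ cd.2,
      (PySem.Dict.mk test).get? cd.1 = some cd.2 ∧
      (PySem.Dict.mk cd.2).get? ti.1 = some ti.2 := by
    intro cd hcd ti hti
    exact ⟨pv_get?_of_nodup hns (Prod.mk.eta ▸ hcd),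
      pv_get?_of_nodup (hins cd hcd) (Prod.mk.eta ▸ hti)⟩
  have hLtrain : ∀ cd ∈ train, ∀ ti ∈ cd.2,
      (PySem.Dict.mk train).get? cd.1 = some cd.2 ∧
      (PySem.Dict.mk cd.2).get? ti.1 = some ti.2 := by
    intro cd hcd ti hti
    exact ⟨pv_get?_of_nodup hnt (Prod.mk.eta ▸ hcd),
      pv_get?_of_nodup (hint cd hcd) (Prod.mk.eta ▸ hti)⟩
  have hPt : (pvPairs test).Nodup := pv_pairs_nodup test hns hins
  have hPr : (pvPairs train).Nodup := pv_pairs_nodup train hnt hint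
  have hpred : ∀ p : String × String,
      PySem.Set.contains (pvPairs test) p = pvHasPair test p.1 p.2 := by
    intro p
    obtain ⟨c, t⟩ := p
    by_cases h : (c, t) ∈ pvPairs test
    · rw [(PySem.Set.contains_iff _ _).2 h, pv_mem_hasPair test hns h]
    · have h1 : PySem.Set.contains (pvPairs test) (c, t) = false := by
        rw [← Bool.not_eq_true]
        intro hc
        exact h ((PySem.Set.contains_iff _ _).1 hc)
      have h2 : pvHasPair test c t = false := by
        rw [← Bool.not_eq_true]
        intro hc
        exact h (pv_hasPair_mem test hc)
      rw [h1, h2]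
  -- B side: the counter fold, its keys and its values
  simp only [collect_reject_alt, List.foldl_cons, List.foldl_nil]
  rw [pv_cnt_flatten, pv_cnt_flatten, ← List.foldl_append]
  set E := pvEntries test ++ pvEntries train with hE
  set counts := E.foldl (fun d e => d.modify e.1 0 (· + e.2)) PySem.Dict.empty with hc
  have hkeys : counts.keys =
      pvPairs test ++ (pvPairs train).filter (fun ct => !(pvHasPair test ct.1 ct.2)) := by
    rw [hc, pv_cnt_keys, hE, List.map_append, pv_entries_fst, pv_entries_fst,
      PySem.Set.ofList_append, PySem.Set.ofList_eq_self_of_nodup _ hPt,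
      PySem.Set.update_eq_append_filter, PySem.Set.ofList_eq_self_of_nodup _ hPr]
    congr 1
    exact List.filter_congr (fun p _ => by rw [hpred p])
  have hknd : counts.keys.Nodup := by rw [hc]; exact pv_cnt_keys_nodup E
  have hcount : ∀ p : String × String,
      counts.getD p 0 = pvPairCount train p.1 p.2 + pvPairCount test p.1 p.2 := by
    intro p
    obtain ⟨c, t⟩ := p
    rw [hc, pv_cnt_getD, hE, List.filter_append, List.map_append, List.sum_append,
      pv_entries_sum test c t hns hins, pv_entries_sum train c t hnt hint]
    simp [Nat.add_comm]
  rw [PySem.Dict.items_eq_map_keys counts hknd 0, hkeys,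
    pv_rej_fold train test _ _ _ (fun p _ => hcount p), List.foldl_append]
  -- A side: the two passes, with the shared pairs dropped from the second
  simp only [collect_reject]
  rw [pv_pass_test train test test hLtest, pv_pass_train train test train hLtrain]
  congr 1
  have hempty : ((PySem.Dict.empty :
      PySem.Dict String (PySem.Set String)).items.map Prod.fst).Nodup := by
    simp [PySem.Dict.empty]
  apply pv_filter_fold train test _ _
    (pv_keys_nodup_foldl train test _ _ hempty)
  intro ct h1 h2
  exact pv_mem_after_foldl train test _ _ (pv_hasPair_mem test h1) h2
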